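-- pv_equiv track=rewrite | github.com/jramaswami/Binary_Search_Python | equivalent_product_pairs.py | solve
-- ===== SOURCE A (Python) =====
-- from collections import defaultdict
--
-- def solve(nums):
--     products = defaultdict(int)
--     for i, a in enumerate(nums):
--         for b in nums[i+1:]:
--             products[a*b] += 1
--
--     soln = 0
--     for prod, freq in products.items():
--         if freq >= 2:
--             nC2 = ((freq - 1) * (freq)) // 2
--             soln += 8 * nC2
--     return soln
-- ===== SOURCE B (Python) =====
-- def solve(nums):
--     # Sort the list of all pairwise products and scan equal runs; each run of
--     # length r contributes r*(r-1)//2 pairs, times 8 at the end. No dict needed.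
--     prods = sorted(a * b for i, a in enumerate(nums) for b in nums[i + 1:])
--     total = 0
--     run = 1
--     for prev, cur in zip(prods, prods[1:]):
--         if cur == prev:
--             run += 1
--         else:
--             total += run * (run - 1) // 2
--             run = 1
--     if prods:
--         total += run * (run - 1) // 2
--     return 8 * total
-- ===== Notes on version B (the rewrite author's own statement) =====
-- stated objective: alternative
-- what changed: Replaces the defaultdict counting plus per-key nC2 aggregation by sort-then-scan: sort the flat list of pairwise products and accumulate r*(r-1)//2 over maximal equal runs in one linear scan.
import Mathlib
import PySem

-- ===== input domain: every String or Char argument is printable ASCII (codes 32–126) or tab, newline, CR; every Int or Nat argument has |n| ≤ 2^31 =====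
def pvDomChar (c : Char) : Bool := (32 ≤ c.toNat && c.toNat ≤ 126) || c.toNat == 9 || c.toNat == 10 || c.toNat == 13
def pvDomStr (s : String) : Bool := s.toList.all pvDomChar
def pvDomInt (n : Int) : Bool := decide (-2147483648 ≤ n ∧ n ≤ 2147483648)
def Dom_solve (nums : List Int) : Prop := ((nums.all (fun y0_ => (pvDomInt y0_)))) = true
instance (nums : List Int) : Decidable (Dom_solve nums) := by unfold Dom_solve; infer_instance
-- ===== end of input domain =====

-- B replaces A's dict-count-then-aggregate by sort-then-scan over the flat product list (alternative decomposition, no dict).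

-- ===== PORT A =====
def solve (nums : List Int) : Int :=
  let products : PySem.Dict Int Int :=
    (PySem.List.enumerate nums 0).foldl
      (fun d p =>
        (PySem.List.slice nums (some (p.1 + 1)) none).foldl
          (fun d b => d.modify (p.2 * b) 0 (· + 1)) d)
      PySem.Dict.empty
  products.items.foldl
    (fun soln it =>
      if it.2 ≥ 2 then soln + 8 * PySem.Int.floordiv ((it.2 - 1) * it.2) 2 else soln)
    0

-- ===== PORT B =====
def solve_alt (nums : List Int) : Int :=
  let prods : List Int :=
    PySem.List.sorted
      ((PySem.List.enumerate nums 0).flatMap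
        (fun p => (PySem.List.slice nums (some (p.1 + 1)) none).map (fun b => p.2 * b)))
      (fun x => x) false
  let st : Int × Int :=
    (prods.zip (PySem.List.slice prods (some 1) none)).foldl
      (fun st pc =>
        if pc.2 = pc.1 then (st.1, st.2 + 1)
        else (st.1 + PySem.Int.floordiv (st.2 * (st.2 - 1)) 2, 1))
      (0, 1)
  let total : Int :=
    if prods = [] then st.1
    else st.1 + PySem.Int.floordiv (st.2 * (st.2 - 1)) 2
  8 * total

-- ===== PRECONDITION & SPEC =====
def Spec_solve (nums : List Int) (out : Int) : Prop := out = solve_alt nums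
instance (nums : List Int) (out : Int) : Decidable (Spec_solve nums out) := by unfold Spec_solve; infer_instance

-- ===== CLAIM (what is proved, stated in full; the proofs are below) =====
def Claim_equal_solve : Prop := ∀ (nums : List Int), Dom_solve nums → Spec_solve nums (solve nums)

-- ===== LEMMAS AND PROOFS =====

-- A's per-product contribution, and r*(r-1)//2 (one run's pair count)
def pvF (c : Int) : Int := if c ≥ 2 then 8 * PySem.Int.floordiv ((c - 1) * c) 2 else 0
def pvQ (c : Int) : Int := PySem.Int.floordiv (c * (c - 1)) 2

-- the flat list of pairwise products both versions traverse
def pvProds (nums : List Int) : List Int :=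
  (PySem.List.enumerate nums 0).flatMap
    (fun p => (PySem.List.slice nums (some (p.1 + 1)) none).map (fun b => p.2 * b))

-- A's aggregate: sum over distinct values of pvF of the multiplicity
def pvS (l : List Int) : Int :=
  ((PySem.Set.ofList l).map (fun k => pvF (l.count k : Int))).sum

-- pair count by first-occurrence grouping
def pvT : List Int → Int
  | [] => 0
  | x :: l => pvQ (1 + (l.count x : Int)) + pvT (l.filter (fun y => !(y == x)))
termination_by l => l.length
decreasing_by simp; exact le_trans (List.length_filter_le _ _) (by simp)

-- B's scan loop, recursively over the list itself
def pvLoop : Int → Int → List Int → Int × Int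
  | t, r, a :: b :: rest =>
    if b = a then pvLoop t (r + 1) (b :: rest)
    else pvLoop (t + pvQ r) 1 (b :: rest)
  | t, r, _ => (t, r)

lemma pvF_q (n : Nat) : pvF (n : Int) = 8 * pvQ (n : Int) := by
  unfold pvF pvQ
  by_cases h : 2 ≤ n
  · rw [if_pos (by exact_mod_cast h), mul_comm ((n : Int) - 1)]
  · interval_cases n <;> decide

lemma pvFoldl_flatMap {α β γ : Type} (xs : List α) (g : α → List β) (f : γ → β → γ) (init : γ) :
    (xs.flatMap g).foldl f init = xs.foldl (fun acc x => (g x).foldl f acc) init := by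
  induction xs generalizing init with
  | nil => rfl
  | cons x xs ih => simp [List.flatMap_cons, List.foldl_append, ih]

-- A's aggregation fold is the sum of pvF over the item values
lemma pvAgg_eq_sum (l : List (Int × Int)) (init : Int) :
    l.foldl (fun soln it =>
        if it.2 ≥ 2 then soln + 8 * PySem.Int.floordiv ((it.2 - 1) * it.2) 2 else soln) init
      = init + (l.map (fun it => pvF it.2)).sum := by
  induction l generalizing init with
  | nil => simp
  | cons x xs ih =>
    simp only [List.foldl_cons, List.map_cons, List.sum_cons, ih, pvF]
    split_ifs <;> ring

-- Set.ofList commutes with filter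
lemma pvOfList_filter (l : List Int) (p : Int → Bool) :
    PySem.Set.ofList (l.filter p) = (PySem.Set.ofList l).filter p := by
  induction l with
  | nil => rfl
  | cons y t ih =>
    by_cases hy : p y
    · rw [List.filter_cons_of_pos hy, PySem.Set.ofList_cons, PySem.Set.ofList_cons,
        List.filter_cons_of_pos hy]
      show _ :: List.filter _ (PySem.Set.ofList (t.filter p)) = _
      rw [ih]
      show _ = y :: List.filter p (List.filter (fun z => !(z == y)) (PySem.Set.ofList t))
      rw [List.filter_filter, List.filter_filter]
      congr 1
      refine List.filter_congr (fun a _ => ?_)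
      by_cases h : a = y
      · subst h; simp [hy]
      · simp [Bool.and_comm]
    · rw [List.filter_cons_of_neg hy, PySem.Set.ofList_cons,
        List.filter_cons_of_neg hy, ih]
      show List.filter p (PySem.Set.ofList t) = List.filter p (List.filter _ (PySem.Set.ofList t))
      rw [List.filter_filter]
      refine (List.filter_congr (fun a _ => ?_)).symm
      by_cases h : a = y
      · subst h; simp [hy]
      · simp [h]

lemma pvS_eq_aux : ∀ (n : Nat) (l : List Int), l.length ≤ n → pvS l = 8 * pvT l := by
  intro n
  induction n with
  | zero =>
    intro l hl
    rw [List.length_eq_zero_iff.mp (Nat.le_zero.mp hl)]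
    rw [pvT]; rfl
  | succ n ih =>
    intro l hl
    match l with
    | [] => rw [pvT]; rfl
    | x :: t =>
      rw [pvT, pvS, PySem.Set.ofList_cons]
      show (pvF _ + _ : Int) = _
      rw [List.count_cons_self]
      have hmap : ∀ k ∈ (PySem.Set.ofList t).discard x,
          pvF (((x :: t).count k : Nat) : Int)
            = pvF ((t.filter (fun y => !(y == x))).count k : Int) := by
        intro k hk
        have hkx : k ≠ x := by
          simp [PySem.Set.discard, List.mem_filter] at hk; exact hk.2
        rw [List.count_filter (by simp [hkx]), List.count_cons,
          if_neg (by simpa using Ne.symm hkx)]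
        simp
      have hdisc : (PySem.Set.ofList t).discard x
          = PySem.Set.ofList (t.filter (fun y => !(y == x))) := by
        rw [pvOfList_filter]; rfl
      have hlen : (t.filter (fun y => !(y == x))).length ≤ n :=
        le_trans (List.length_filter_le _ _) (by simpa using Nat.le_of_succ_le_succ hl)
      calc pvF ((t.count x + 1 : Nat) : Int)
            + (((PySem.Set.ofList t).discard x).map
                (fun k => pvF (((x :: t).count k : Nat) : Int))).sum
          = pvF ((t.count x + 1 : Nat) : Int)
            + (((PySem.Set.ofList t).discard x).map
                (fun k => pvF ((t.filter (fun y => !(y == x))).count k : Int))).sum := by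
            rw [List.map_congr_left hmap]
        _ = pvF ((t.count x + 1 : Nat) : Int) + pvS (t.filter (fun y => !(y == x))) := by
            rw [pvS, hdisc]
        _ = 8 * (pvQ (1 + (t.count x : Int)) + pvT (t.filter (fun y => !(y == x)))) := by
            rw [ih _ hlen]
            have h2 : ((t.count x + 1 : Nat) : Int) = 1 + (t.count x : Int) := by push_cast; ring
            rw [pvF_q, h2]; ring

lemma pvS_eq (l : List Int) : pvS l = 8 * pvT l := pvS_eq_aux l.length l le_rfl

-- pvS is a function of the multiset of products
lemma pvS_perm (l l' : List Int) (h : l.Perm l') : pvS l = pvS l' := by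
  have hset : (PySem.Set.ofList l).Perm (PySem.Set.ofList l') :=
    (List.perm_ext_iff_of_nodup (PySem.Set.nodup_ofList l) (PySem.Set.nodup_ofList l')).mpr
      (fun a => by simp [PySem.Set.mem_ofList, h.mem_iff])
  unfold pvS
  rw [List.map_congr_left (fun k _ => by rw [h.count_eq])]
  exact (hset.map _).sum_eq

-- B's fold over zipped neighbours is pvLoop
lemma pvZipFold (l : List Int) (t r : Int) :
    (l.zip (PySem.List.slice l (some 1) none)).foldl
      (fun st pc =>
        if pc.2 = pc.1 then (st.1, st.2 + 1)
        else (st.1 + PySem.Int.floordiv (st.2 * (st.2 - 1)) 2, 1))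
      (t, r) = pvLoop t r l := by
  rw [PySem.List.slice_from_one]
  induction t, r, l using pvLoop.induct with
  | case1 t r a rest ih =>
    rw [pvLoop, if_pos rfl]
    simpa using ih
  | case2 t r a b rest h ih =>
    rw [pvLoop, if_neg h]
    simp only [List.tail_cons, List.zip_cons_cons, List.foldl_cons, if_neg h]
    show List.foldl _ (t + pvQ r, 1) _ = _
    simpa using ih
  | case3 l t r h =>
    match l, h with
    | [], _ => rfl
    | [x], _ => rfl
    | a :: b :: rest, h => exact (h a b rest rfl).elim

-- scanning a sorted list groups its equal elements into runs
lemma pvRun (s : List Int) : ∀ (prev t r : Int), (prev :: s).Pairwise (· ≤ ·) →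
    (pvLoop t r (prev :: s)).1 + pvQ (pvLoop t r (prev :: s)).2
      = t + pvQ (r + (s.count prev : Int)) + pvT (s.filter (fun y => !(y == prev))) := by
  induction s with
  | nil =>
    intro prev t r _
    simp [pvLoop, pvT]
  | cons x rest ih =>
    intro prev t r hp
    by_cases hxp : x = prev
    · subst hxp
      rw [pvLoop, if_pos rfl]
      rw [ih x t (r + 1) (List.pairwise_cons.mp hp).2]
      rw [List.count_cons_self, List.filter_cons_of_neg (by simp)]
      have harg : r + 1 + (List.count x rest : Int) = r + ((List.count x rest + 1 : Nat) : Int) := by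
        push_cast; ring
      rw [harg]
    · rw [pvLoop, if_neg hxp]
      have hp2 : (x :: rest).Pairwise (· ≤ ·) := (List.pairwise_cons.mp hp).2
      have hple : ∀ y ∈ x :: rest, prev ≤ y := (List.pairwise_cons.mp hp).1
      have hplt : prev < x := lt_of_le_of_ne (hple x (by simp)) (fun h => hxp h.symm)
      have hnm : prev ∉ x :: rest := by
        intro hm
        rcases List.mem_cons.mp hm with h | h
        · exact hxp h.symm
        · exact absurd ((List.pairwise_cons.mp hp2).1 prev h) (not_le.mpr hplt)
      have hfil : List.filter (fun y => !(y == prev)) (x :: rest) = x :: rest :=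
        List.filter_eq_self.mpr (fun y hy => by
          have hyp : y ≠ prev := fun h => hnm (h ▸ hy)
          simp [hyp])
      rw [List.count_eq_zero_of_not_mem hnm, hfil]
      conv_rhs => rw [pvT]
      rw [ih x (t + pvQ r) 1 hp2]
      push_cast
      rw [add_zero]
      ring

-- ===== VERDICT (by name: the statement is the Claim_ definition above) =====
theorem solve_spec : Claim_equal_solve := by
  intro nums _
  show solve nums = solve_alt nums
  have hA : solve nums = pvS (pvProds nums) := by
    simp only [solve]
    have h1 : (PySem.List.enumerate nums 0).foldl
        (fun d p => (PySem.List.slice nums (some (p.1 + 1)) none).foldl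
          (fun d b => PySem.Dict.modify d (p.2 * b) 0 (· + 1)) d)
          (PySem.Dict.empty (κ := Int) (ν := Int))
        = (pvProds nums).foldl (fun d x => PySem.Dict.modify d x 0 (· + 1)) PySem.Dict.empty := by
      rw [pvProds, pvFoldl_flatMap]
      simp only [List.foldl_map]
    rw [h1, ← PySem.Dict.counter_eq_foldl, pvAgg_eq_sum, PySem.Dict.items_counter,
      List.map_map]
    simp [pvS, Function.comp_def]
  rw [hA]
  simp only [solve_alt]
  rw [pvZipFold]
  have hperm : (PySem.List.sorted (pvProds nums) (fun x => x) false).Perm (pvProds nums) :=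
    PySem.List.sorted_perm _ _ _
  rw [show ((PySem.List.enumerate nums 0).flatMap
      (fun p => (PySem.List.slice nums (some (p.1 + 1)) none).map (fun b => p.2 * b)))
      = pvProds nums from rfl]
  rcases hs : PySem.List.sorted (pvProds nums) (fun x => x) false with _ | ⟨p, rest⟩
  · have : pvProds nums = [] := (PySem.List.sorted_eq_nil_iff _ _ _).mp hs
    rw [this]
    simp [pvLoop, pvS]
  · rw [if_neg (by simp)]
    have hsorted : (p :: rest).Pairwise (· ≤ ·) := by
      have := PySem.List.sorted_pairwise (pvProds nums) (fun x => x)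
      rw [hs] at this
      exact this
    have hrun := pvRun rest p 0 1 hsorted
    have hq : PySem.Int.floordiv ((pvLoop 0 1 (p :: rest)).2 * ((pvLoop 0 1 (p :: rest)).2 - 1)) 2
        = pvQ (pvLoop 0 1 (p :: rest)).2 := rfl
    rw [hq, hrun]
    rw [pvS_perm (pvProds nums) (p :: rest) ((hs ▸ hperm).symm), pvS_eq]
    conv_lhs => rw [pvT]
    ring
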